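-- pv_equiv track=rewrite | github.com/Proschnipser/qtoolsFork | ColToPosToCol.py | IndexConverter
-- ===== SOURCE A (Python) =====
-- def IndexConverter(MSAseq):
--     poscolIdxs=[]
--     colposIdxs=[]
--     Pc=0
--     Cc=-1
--
--     for col in range(len(MSAseq)):
--         if MSAseq[col].isalpha():
--             Cc+=1
--             poscolIdxs.append(Pc+Cc)
--         else:
--             Pc+=1
--         colposIdxs.append(Cc)
--
--     return poscolIdxs, colposIdxs
-- ===== SOURCE B (Python) =====
-- def IndexConverter(MSAseq):
--     # poscolIdxs is just the list of alphabetic positions; colposIdxs is built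
--     # by filling constant segments between consecutive alphabetic positions.
--     n = len(MSAseq)
--     poscolIdxs = [i for i, c in enumerate(MSAseq) if c.isalpha()]
--     colposIdxs = []
--     k = 0
--     prev = 0
--     for j in poscolIdxs:
--         colposIdxs += [k - 1] * (j - prev)
--         prev = j
--         k += 1
--     colposIdxs += [k - 1] * (n - prev)
--     return poscolIdxs, colposIdxs
-- ===== Notes on version B (the rewrite author's own statement) =====
-- stated objective: simpler
-- what changed: B drops A's Pc/Cc counter state machine: it reads poscolIdxs directly as the alphabetic positions (one comprehension) and builds colposIdxs by filling constant runs between consecutive alphabetic positions instead of appending one counter value per column.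
import Mathlib
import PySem

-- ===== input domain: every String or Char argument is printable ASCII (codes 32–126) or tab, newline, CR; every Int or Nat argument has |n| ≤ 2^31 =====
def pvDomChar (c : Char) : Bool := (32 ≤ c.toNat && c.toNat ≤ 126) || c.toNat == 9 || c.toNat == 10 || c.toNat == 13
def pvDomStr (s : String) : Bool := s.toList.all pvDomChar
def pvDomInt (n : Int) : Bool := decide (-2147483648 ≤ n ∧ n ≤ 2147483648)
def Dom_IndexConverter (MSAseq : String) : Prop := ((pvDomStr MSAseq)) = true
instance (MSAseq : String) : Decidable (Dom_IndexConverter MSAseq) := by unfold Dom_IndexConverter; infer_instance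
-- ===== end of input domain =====

-- B replaces A's Pc/Cc counter loop by a comprehension over alphabetic positions plus
-- constant-run filling of colposIdxs between them (objective: simpler).

-- ===== PORT A =====
-- single loop over range(len(MSAseq)), state (poscolIdxs, colposIdxs, Pc, Cc)
def IndexConverter (MSAseq : String) : List Int × List Int :=
  let r := (PySem.List.pyRange 0 (PySem.Str.len MSAseq) 1).foldl
    (fun (st : List Int × List Int × Int × Int) col =>
      let c := PySem.List.pyGetD MSAseq.toList col ' '
      if PySem.Chars.isalpha c then
        (st.1 ++ [st.2.2.1 + (st.2.2.2 + 1)], st.2.1 ++ [st.2.2.2 + 1], st.2.2.1, st.2.2.2 + 1)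
      else
        (st.1, st.2.1 ++ [st.2.2.2], st.2.2.1 + 1, st.2.2.2))
    ([], [], 0, -1)
  (r.1, r.2.1)

-- ===== PORT B =====
def IndexConverter_alt (MSAseq : String) : List Int × List Int :=
  let n : Int := PySem.Str.len MSAseq
  let poscolIdxs := (PySem.List.enumerate MSAseq.toList 0).filterMap
    (fun p => if PySem.Chars.isalpha p.2 then some p.1 else none)
  let r := poscolIdxs.foldl
    (fun (st : List Int × Int × Int) j =>
      (st.1 ++ List.replicate (j - st.2.2).toNat (st.2.1 - 1), st.2.1 + 1, j))
    ([], 0, 0)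
  (poscolIdxs, r.1 ++ List.replicate (n - r.2.2).toNat (r.2.1 - 1))

-- ===== PRECONDITION & SPEC =====
def Spec_IndexConverter (MSAseq : String) (out : List Int × List Int) : Prop := out = IndexConverter_alt MSAseq
instance (MSAseq : String) (out : List Int × List Int) : Decidable (Spec_IndexConverter MSAseq out) := by unfold Spec_IndexConverter; infer_instance

-- ===== CLAIM (what is proved, stated in full; the proofs are below) =====
def Claim_equal_IndexConverter : Prop := ∀ (MSAseq : String), Dom_IndexConverter MSAseq → Spec_IndexConverter MSAseq (IndexConverter MSAseq)

-- ===== LEMMAS AND PROOFS =====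

-- reference: alphabetic positions starting at index i
def specPos : List Char → Int → List Int
  | [], _ => []
  | c :: t, i => if PySem.Chars.isalpha c then i :: specPos t (i + 1) else specPos t (i + 1)

-- reference: per-column running alpha count minus one, starting from cc
def specCol : List Char → Int → List Int
  | [], _ => []
  | c :: t, cc => if PySem.Chars.isalpha c then (cc + 1) :: specCol t (cc + 1) else cc :: specCol t cc

-- reference for B's fill loop
def fillAux (P : List Int) (k prev n : Int) : List Int :=
  match P with
  | [] => List.replicate (n - prev).toNat (k - 1)
  | j :: t => List.replicate (j - prev).toNat (k - 1) ++ fillAux t (k + 1) j n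

lemma mem_specPos_ge (L : List Char) (i : Int) : ∀ j ∈ specPos L i, i ≤ j := by
  induction L generalizing i with
  | nil => simp [specPos]
  | cons c t ih =>
    intro j hj
    by_cases h : PySem.Chars.isalpha c = true <;> simp [specPos, h] at hj
    · rcases hj with h' | h'
      · omega
      · have := ih (i + 1) j h'; omega
    · have := ih (i + 1) j hj; omega

lemma fillAux_cons (P : List Int) (k prev n : Int) (hn : prev + 1 ≤ n)
    (hP : ∀ j ∈ P, prev + 1 ≤ j) :
    fillAux P k prev n = (k - 1) :: fillAux P k (prev + 1) n := by
  cases P with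
  | nil =>
    simp only [fillAux]
    have : (n - prev).toNat = (n - (prev + 1)).toNat + 1 := by omega
    rw [this, List.replicate_succ]
  | cons j t =>
    have hj : prev + 1 ≤ j := hP j (by simp)
    simp only [fillAux]
    have : (j - prev).toNat = (j - (prev + 1)).toNat + 1 := by omega
    rw [this, List.replicate_succ, List.cons_append]

lemma fillAux_specPos (L : List Char) (i k : Int) :
    fillAux (specPos L i) k i (i + L.length) = specCol L (k - 1) := by
  induction L generalizing i k with
  | nil => simp [specPos, specCol, fillAux]
  | cons c t ih =>
    have harr : i + ((t.length : Int) + 1) = (i + 1) + t.length := by ring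
    by_cases h : PySem.Chars.isalpha c = true <;>
      simp only [specPos, specCol, h, List.length_cons, if_true, Bool.false_eq_true,
        if_false, ite_true, ite_false, Nat.cast_add, Nat.cast_one, harr]
    · simp only [fillAux]
      have h0 : (i - i).toNat = 0 := by omega
      rw [h0, List.replicate_zero, List.nil_append]
      rw [fillAux_cons _ _ _ _ (by omega) (mem_specPos_ge t (i + 1))]
      have := ih (i + 1) (k + 1)
      rw [this]
      norm_num
    · rw [fillAux_cons _ _ _ _ (by omega) (mem_specPos_ge t (i + 1))]
      rw [ih (i + 1) k]

-- A's loop characterised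
lemma A_fold (L : List Char) (pos cp : List Int) (Pc Cc : Int) :
    L.foldl
      (fun (st : List Int × List Int × Int × Int) c =>
        if PySem.Chars.isalpha c then
          (st.1 ++ [st.2.2.1 + (st.2.2.2 + 1)], st.2.1 ++ [st.2.2.2 + 1], st.2.2.1, st.2.2.2 + 1)
        else
          (st.1, st.2.1 ++ [st.2.2.2], st.2.2.1 + 1, st.2.2.2))
      (pos, cp, Pc, Cc) =
    (pos ++ specPos L (Pc + Cc + 1), cp ++ specCol L Cc,
     (Pc + Cc + 1) + L.length - (Cc + (specPos L (Pc + Cc + 1)).length) - 1,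
     Cc + (specPos L (Pc + Cc + 1)).length) := by
  induction L generalizing pos cp Pc Cc with
  | nil => simp [specPos, specCol]; omega
  | cons c t ih =>
    simp only [List.foldl_cons]
    by_cases h : PySem.Chars.isalpha c = true <;>
      simp only [h, Bool.false_eq_true, if_true, if_false]
    · rw [ih]
      have he : Pc + (Cc + 1) + 1 = Pc + Cc + 1 + 1 := by ring
      have he2 : Pc + (Cc + 1) = Pc + Cc + 1 := by ring
      rw [he, he2]
      simp only [specPos, specCol, h, ite_true, List.length_cons, Prod.mk.injEq,
        List.append_assoc, List.singleton_append]
      push_cast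
      and_intros <;> first | trivial | ring
    · rw [ih]
      have he : Pc + 1 + Cc + 1 = Pc + Cc + 1 + 1 := by ring
      rw [he]
      simp only [specPos, specCol, h, Bool.false_eq_true, ite_false, List.length_cons,
        Prod.mk.injEq, List.append_assoc, List.singleton_append]
      push_cast
      and_intros <;> first | trivial | ring

-- B's comprehension characterised
lemma B_filterMap (L : List Char) (s : Int) :
    (PySem.List.enumerate L s).filterMap
      (fun p => if PySem.Chars.isalpha p.2 then some p.1 else none) = specPos L s := by
  induction L generalizing s with
  | nil => simp [PySem.List.enumerate_nil, specPos]
  | cons c t ih =>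
    rw [PySem.List.enumerate_cons]
    simp only [List.filterMap_cons, specPos]
    by_cases h : PySem.Chars.isalpha c = true <;> simp [h, ih]

-- B's fill loop characterised
lemma B_fold (P : List Int) (cp : List Int) (k prev n : Int) :
    (let r := P.foldl
      (fun (st : List Int × Int × Int) j =>
        (st.1 ++ List.replicate (j - st.2.2).toNat (st.2.1 - 1), st.2.1 + 1, j))
      (cp, k, prev)
     r.1 ++ List.replicate (n - r.2.2).toNat (r.2.1 - 1)) = cp ++ fillAux P k prev n := by
  induction P generalizing cp k prev with
  | nil => simp [fillAux]
  | cons j t ih =>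
    simp only [List.foldl_cons, fillAux]
    rw [ih]
    simp

-- ===== VERDICT (by name: the statement is the Claim_ definition above) =====
theorem IndexConverter_spec : Claim_equal_IndexConverter := by
  intro s _
  unfold Spec_IndexConverter IndexConverter IndexConverter_alt
  rw [show (PySem.Str.len s) = (s.toList.length : Int) from by simp [PySem.Str.len_eq]]
  rw [PySem.List.foldl_pyRange_zero_pyGetD' s.toList ' '
    (fun (st : List Int × List Int × Int × Int) c =>
      if PySem.Chars.isalpha c then
        (st.1 ++ [st.2.2.1 + (st.2.2.2 + 1)], st.2.1 ++ [st.2.2.2 + 1], st.2.2.1, st.2.2.2 + 1)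
      else
        (st.1, st.2.1 ++ [st.2.2.2], st.2.2.1 + 1, st.2.2.2))
    ([], [], 0, -1)]
  rw [A_fold s.toList [] [] 0 (-1), B_filterMap s.toList 0]
  have hb := B_fold (specPos s.toList 0) [] 0 0 (s.toList.length : Int)
  simp only [List.nil_append] at hb ⊢
  have hf := fillAux_specPos s.toList 0 0
  simp only [zero_add] at hf
  rw [Prod.mk.injEq]
  constructor
  · norm_num
  · rw [hb, hf]
    norm_num
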